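-- pv_equiv track=rewrite | github.com/fernandoFernandeSantos/radiation-benchmarks-parsers | ParsersClasses/Parser.py | _localityParser3D
-- ===== SOURCE A (Python) =====
-- import collections
--
-- def _localityParser3D(errList):
--     if len(errList) < 1:
--         return [0, 0, 0, 0, 0]
--     elif len(errList) == 1:
--         return [0, 0, 0, 1, 0]
--     else:
--         allXPositions = [x[0] for x in errList]  # Get all positions of X
--         allYPositions = [x[1] for x in errList]  # Get all positions of Y
--         allZPositions = [x[2] for x in errList]  # Get all positions of Y
--         counterXPositions = collections.Counter(allXPositions)  # Count how many times each value is in the list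
--         counterYPositions = collections.Counter(allYPositions)  # Count how many times each value is in the list
--         counterZPositions = collections.Counter(allZPositions)  # Count how many times each value is in the list
--         rowError = any(
--             x > 1 for x in counterXPositions.values())  # Check if any value is in the list more than one time
--         colError = any(
--             x > 1 for x in counterYPositions.values())  # Check if any value is in the list more than one time
--         heightError = any(
--             x > 1 for x in counterZPositions.values())  # Check if any value is in the list more than one time
--         if rowError and colError and heightError:  # cubic error
--             return [1, 0, 0, 0, 0]
--         if (rowError and colError) or (rowError and heightError) or (heightError and colError):  # square error
--             return [0, 1, 0, 0, 0]
--         elif rowError or colError or heightError:  # line error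
--             return [0, 0, 1, 0, 0]
--         else:  # random error
--             return [0, 0, 0, 0, 1]
-- ===== SOURCE B (Python) =====
-- def _localityParser3D(errList):
--     n = len(errList)
--     if n < 1:
--         return [0, 0, 0, 0, 0]
--     if n == 1:
--         return [0, 0, 0, 1, 0]
--     hits = 0
--     for vals in ([e[0] for e in errList],
--                  [e[1] for e in errList],
--                  [e[2] for e in errList]):
--         s = sorted(vals)
--         if any(a == b for a, b in zip(s, s[1:])):
--             hits += 1
--     return [int(hits == 3), int(hits == 2), int(hits == 1), 0, int(hits == 0)]
-- ===== Notes on version B (the rewrite author's own statement) =====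
-- stated objective: alternative
-- what changed: Detects per-axis duplicates by sorting each coordinate list and scanning adjacent pairs (instead of building Counters and testing multiplicities), accumulates a single hit count in one fold, and builds the one-hot answer arithmetically instead of the nested boolean if/elif cascade.
import Mathlib
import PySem

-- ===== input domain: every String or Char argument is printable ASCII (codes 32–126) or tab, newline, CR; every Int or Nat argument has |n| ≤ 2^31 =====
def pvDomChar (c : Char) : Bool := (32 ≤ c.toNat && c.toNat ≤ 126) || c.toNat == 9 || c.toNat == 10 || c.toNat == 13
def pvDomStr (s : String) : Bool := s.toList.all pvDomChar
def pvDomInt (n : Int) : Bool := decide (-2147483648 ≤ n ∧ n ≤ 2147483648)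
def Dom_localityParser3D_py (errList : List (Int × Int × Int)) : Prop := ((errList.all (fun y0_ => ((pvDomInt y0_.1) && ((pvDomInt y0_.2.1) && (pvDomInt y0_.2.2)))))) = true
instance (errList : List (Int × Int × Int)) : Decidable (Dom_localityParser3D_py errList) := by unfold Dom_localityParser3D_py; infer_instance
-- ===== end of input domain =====

-- B detects per-axis duplicates by sort-then-adjacent-scan, counts the hit axes in one fold,
-- and builds the one-hot result arithmetically instead of A's Counters + nested if/elif (objective: alternative).
-- ===== PORT A =====
def localityParser3D_py (errList : List (Int × Int × Int)) : List Int :=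
  if errList.length < 1 then [0, 0, 0, 0, 0]
  else if errList.length = 1 then [0, 0, 0, 1, 0]
  else
    let allXPositions := errList.map (fun x => x.1)
    let allYPositions := errList.map (fun x => x.2.1)
    let allZPositions := errList.map (fun x => x.2.2)
    let counterXPositions := PySem.Dict.counter allXPositions
    let counterYPositions := PySem.Dict.counter allYPositions
    let counterZPositions := PySem.Dict.counter allZPositions
    let rowError := counterXPositions.values.any (fun x => 1 < x)
    let colError := counterYPositions.values.any (fun x => 1 < x)
    let heightError := counterZPositions.values.any (fun x => 1 < x)
    if rowError && colError && heightError then [1, 0, 0, 0, 0]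
    else if (rowError && colError) || (rowError && heightError) || (heightError && colError) then
      [0, 1, 0, 0, 0]
    else if rowError || colError || heightError then [0, 0, 1, 0, 0]
    else [0, 0, 0, 0, 1]

-- ===== PORT B =====
-- s = sorted(vals); any(a == b for a, b in zip(s, s[1:]))  — s[1:] is s.drop 1 (exact: PySem.List.slice_from)
def pvSortedDup (vals : List Int) : Bool :=
  let s := PySem.List.sorted vals (fun x => x) false
  (s.zip (s.drop 1)).any (fun p => p.1 == p.2)

def localityParser3D_py_alt (errList : List (Int × Int × Int)) : List Int :=
  if errList.length < 1 then [0, 0, 0, 0, 0]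
  else if errList.length = 1 then [0, 0, 0, 1, 0]
  else
    let hits : Int :=
      [errList.map (fun e => e.1), errList.map (fun e => e.2.1), errList.map (fun e => e.2.2)].foldl
        (fun h vals => if pvSortedDup vals then h + 1 else h) 0
    [if hits = 3 then 1 else 0, if hits = 2 then 1 else 0, if hits = 1 then 1 else 0, 0,
     if hits = 0 then 1 else 0]

-- ===== PRECONDITION & SPEC =====
def Spec_localityParser3D_py (errList : List (Int × Int × Int)) (out : List Int) : Prop := out = localityParser3D_py_alt errList
instance (errList : List (Int × Int × Int)) (out : List Int) : Decidable (Spec_localityParser3D_py errList out) := by unfold Spec_localityParser3D_py; infer_instance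

-- ===== CLAIM (what is proved, stated in full; the proofs are below) =====
def Claim_equal_localityParser3D_py : Prop := ∀ (errList : List (Int × Int × Int)), Dom_localityParser3D_py errList → Spec_localityParser3D_py errList (localityParser3D_py errList)

-- ===== LEMMAS AND PROOFS =====
-- A's Counter-based duplicate test for one dimension decides ¬ Nodup.
theorem counter_any_eq_not_nodup (xs : List Int) :
    (PySem.Dict.counter xs).values.any (fun x => 1 < x) = !decide xs.Nodup := by
  have hv : (PySem.Dict.counter xs).values
      = (PySem.Set.ofList xs).map (fun k => (xs.count k : Int)) := by
    have := PySem.Dict.items_counter (xs := xs)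
    simp [PySem.Dict.values, this]
  rw [hv]
  by_cases hnd : xs.Nodup
  · simp [hnd, PySem.Set.mem_ofList]
    intro k hk
    have := List.nodup_iff_count_le_one.mp hnd k
    omega
  · simp [hnd, PySem.Set.mem_ofList]
    rw [List.nodup_iff_count_le_one] at hnd
    push_neg at hnd
    obtain ⟨k, hk⟩ := hnd
    exact ⟨k, List.count_pos_iff.mp (by omega), by exact_mod_cast hk⟩

-- on a ≤-sorted list, an adjacent equal pair exists iff the list has a duplicate
theorem adj_dup_of_pairwise (l : List Int) (h : l.Pairwise (· ≤ ·)) :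
    (l.zip (l.drop 1)).any (fun p => p.1 == p.2) = !decide l.Nodup := by
  induction l with
  | nil => simp
  | cons a t ih =>
    cases t with
    | nil => simp
    | cons b u =>
      have ht : (b :: u).Pairwise (· ≤ ·) := h.tail
      have hab : a ≤ b := (List.pairwise_cons.mp h).1 b (by simp)
      by_cases heq : a = b
      · subst heq
        simp
      · have hnotmem : a ∉ b :: u := by
          intro hmem
          rcases List.mem_cons.mp hmem with h1 | h2
          · exact heq h1
          · have hb : b ≤ a := (List.pairwise_cons.mp ht).1 a h2
            exact heq (le_antisymm hab hb)
        have : ((a :: b :: u).zip ((a :: b :: u).drop 1)).any (fun p => p.1 == p.2)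
            = ((b :: u).zip ((b :: u).drop 1)).any (fun p => p.1 == p.2) := by
          simp [heq]
        rw [this, ih ht]
        simp [List.nodup_cons, hnotmem]

-- B's sort-then-scan test for one dimension decides the same thing.
theorem sortedDup_eq_not_nodup (xs : List Int) :
    pvSortedDup xs = !decide xs.Nodup := by
  unfold pvSortedDup
  have hperm := PySem.List.sorted_perm (xs := xs) (key := fun x => x) (rev := false)
  show ((PySem.List.sorted xs (fun x => x) false).zip ((PySem.List.sorted xs (fun x => x) false).drop 1)).any (fun p => p.1 == p.2) = _
  rw [adj_dup_of_pairwise _ (PySem.List.sorted_pairwise (xs := xs) (key := fun x => x))]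
  simp [hperm.nodup_iff]

-- ===== VERDICT (by name: the statement is the Claim_ definition above) =====
theorem localityParser3D_py_spec : Claim_equal_localityParser3D_py := by
  intro errList _
  unfold Spec_localityParser3D_py localityParser3D_py localityParser3D_py_alt
  by_cases h1 : errList.length < 1
  · simp [h1]
  · by_cases h2 : errList.length = 1
    · simp [h2]
    · simp only [h1, h2, if_false, counter_any_eq_not_nodup, List.foldl, sortedDup_eq_not_nodup]
      by_cases hx : (errList.map (fun e => e.1)).Nodup <;>
        by_cases hy : (errList.map (fun e => e.2.1)).Nodup <;>
          by_cases hz : (errList.map (fun e => e.2.2)).Nodup <;>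
            simp [hx, hy, hz]
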